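-- pv_equiv track=rewrite | github.com/hamidahoderinwale/cursor-telemetry | components/dashboard/src/clio-integration/kura_bridge.py | _calculate_complexity_distribution
-- ===== SOURCE A (Python) =====
-- from typing import List, Dict, Any, Optional
--
-- def _calculate_complexity_distribution(sequences: List[Dict]) -> Dict[str, int]:
--     """Calculate complexity distribution of sequences"""
--     complexities = [len(sequence.get('actions', [])) for sequence in sequences]
--
--     distribution = {
--         'simple': len([c for c in complexities if c <= 2]),
--         'medium': len([c for c in complexities if 2 < c <= 4]),
--         'complex': len([c for c in complexities if c > 4])
--     }
--     return distribution
-- ===== SOURCE B (Python) =====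
-- def _calculate_complexity_distribution(sequences):
--     """Calculate complexity distribution of sequences (single pass, three counters)"""
--     simple = medium = complex_ = 0
--     for sequence in sequences:
--         n = len(sequence.get('actions', []))
--         if n <= 2:
--             simple += 1
--         elif n <= 4:
--             medium += 1
--         else:
--             complex_ += 1
--     return {'simple': simple, 'medium': medium, 'complex': complex_}
-- ===== Notes on version B (the rewrite author's own statement) =====
-- stated objective: simpler
-- what changed: Replaces the intermediate complexities list and three separate filtering passes with one loop over sequences maintaining three integer counters.
import Mathlib
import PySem

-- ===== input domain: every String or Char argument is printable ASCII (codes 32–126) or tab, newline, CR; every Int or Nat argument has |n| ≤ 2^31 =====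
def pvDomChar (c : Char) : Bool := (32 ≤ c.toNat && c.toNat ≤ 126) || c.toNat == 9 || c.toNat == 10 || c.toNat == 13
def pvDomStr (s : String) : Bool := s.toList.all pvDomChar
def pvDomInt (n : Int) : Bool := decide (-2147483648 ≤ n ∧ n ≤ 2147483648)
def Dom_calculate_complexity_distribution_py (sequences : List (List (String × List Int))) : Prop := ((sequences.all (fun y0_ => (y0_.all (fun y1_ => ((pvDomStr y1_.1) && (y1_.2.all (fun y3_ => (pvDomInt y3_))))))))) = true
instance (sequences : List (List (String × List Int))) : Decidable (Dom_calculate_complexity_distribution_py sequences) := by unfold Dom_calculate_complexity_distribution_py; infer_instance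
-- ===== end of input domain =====

-- B replaces A's intermediate list and three filter passes with one counting pass; return value only.


-- shared helper: Python's sequence.get('actions', []) — first match in the assoc list, default []
def pvActions : List (String × List Int) → List Int
  | [] => []
  | (k, v) :: rest => if k = "actions" then v else pvActions rest

-- ===== PORT A =====
def calculate_complexity_distribution_py (sequences : List (List (String × List Int))) : List (String × Int) :=
  let complexities : List Int := sequences.map (fun s => ((pvActions s).length : Int))
  [("simple", ((complexities.filter (fun c => c ≤ 2)).length : Int)),
   ("medium", ((complexities.filter (fun c => 2 < c && c ≤ 4)).length : Int)),
   ("complex", ((complexities.filter (fun c => 4 < c)).length : Int))]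

-- ===== PORT B =====
def pvStepB (acc : Int × Int × Int) (seq : List (String × List Int)) : Int × Int × Int :=
  let n : Int := ((pvActions seq).length : Int)
  if n ≤ 2 then (acc.1 + 1, acc.2.1, acc.2.2)
  else if n ≤ 4 then (acc.1, acc.2.1 + 1, acc.2.2)
  else (acc.1, acc.2.1, acc.2.2 + 1)

def calculate_complexity_distribution_py_alt (sequences : List (List (String × List Int))) : List (String × Int) :=
  let r := sequences.foldl pvStepB (0, 0, 0)
  [("simple", r.1), ("medium", r.2.1), ("complex", r.2.2)]

-- ===== PRECONDITION & SPEC =====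
def Spec_calculate_complexity_distribution_py (sequences : List (List (String × List Int))) (out : List (String × Int)) : Prop := out = calculate_complexity_distribution_py_alt sequences
instance (sequences : List (List (String × List Int))) (out : List (String × Int)) : Decidable (Spec_calculate_complexity_distribution_py sequences out) := by unfold Spec_calculate_complexity_distribution_py; infer_instance

-- ===== CLAIM (what is proved, stated in full; the proofs are below) =====
def Claim_equal_calculate_complexity_distribution_py : Prop := ∀ (sequences : List (List (String × List Int))), Dom_calculate_complexity_distribution_py sequences → Spec_calculate_complexity_distribution_py sequences (calculate_complexity_distribution_py sequences)

-- ===== LEMMAS AND PROOFS =====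

-- loop invariant: the fold adds the three filter counts to the accumulator
theorem pv_foldB (l : List (List (String × List Int))) (a b c : Int) :
    l.foldl pvStepB (a, b, c) =
      (a + ((l.map (fun s => ((pvActions s).length : Int))).filter (fun x => x ≤ 2)).length,
       b + ((l.map (fun s => ((pvActions s).length : Int))).filter (fun x => 2 < x && x ≤ 4)).length,
       c + ((l.map (fun s => ((pvActions s).length : Int))).filter (fun x => 4 < x)).length) := by
  induction l generalizing a b c with
  | nil => simp
  | cons h t ih =>
    simp only [List.foldl_cons, List.map_cons, List.filter_cons]
    by_cases h2 : ((pvActions h).length : Int) ≤ 2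
    · rw [show pvStepB (a, b, c) h = (a + 1, b, c) from by simp [pvStepB, h2], ih]
      have hn2 : ¬ (2 < ((pvActions h).length : Int)) := by omega
      have hn4 : ¬ (4 < ((pvActions h).length : Int)) := by omega
      simp [h2, hn2, hn4]
      omega
    · by_cases h4 : ((pvActions h).length : Int) ≤ 4
      · rw [show pvStepB (a, b, c) h = (a, b + 1, c) from by simp [pvStepB, h2, h4], ih]
        have h2' : (2 : Int) < ((pvActions h).length : Int) := by omega
        have hn4 : ¬ (4 < ((pvActions h).length : Int)) := by omega
        simp [h2, h2', h4, hn4]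
        omega
      · rw [show pvStepB (a, b, c) h = (a, b, c + 1) from by simp [pvStepB, h2, h4], ih]
        have h4' : (4 : Int) < ((pvActions h).length : Int) := by omega
        simp [h2, h4, h4']
        omega

-- ===== VERDICT (by name: the statement is the Claim_ definition above) =====
theorem calculate_complexity_distribution_py_spec : Claim_equal_calculate_complexity_distribution_py := by
  intro sequences _
  unfold Spec_calculate_complexity_distribution_py
  unfold calculate_complexity_distribution_py calculate_complexity_distribution_py_alt
  rw [pv_foldB]
  simp
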